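-- pv_equiv track=rewrite | github.com/Prosen-Ghosh/llm_demo | 60-day-bootcamp/day-22-25/prompt_engineering_demo/app/strategies/react.py | _parse_react_steps
-- ===== SOURCE A (Python) =====
-- from typing import AsyncGenerator, Dict, Any
--
-- def _parse_react_steps(content: str) -> list[Dict[str, str]]:
--     """Parse ReAct formatted response into structured steps"""
--     steps = []
--     lines = content.split("\n")
--     current_step = {}
--
--     for line in lines:
--         line = line.strip()
--         if line.startswith("Thought:"):
--             if current_step:
--                 steps.append(current_step)
--             current_step = {"thought": line.replace("Thought:", "").strip()}
--         elif line.startswith("Action:"):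
--             current_step["action"] = line.replace("Action:", "").strip()
--         elif line.startswith("Observation:"):
--             current_step["observation"] = line.replace("Observation:", "").strip()
--
--     if current_step:
--         steps.append(current_step)
--
--     return steps
-- ===== SOURCE B (Python) =====
-- def _parse_react_steps(content: str) -> list:
--     """Group-then-parse: partition stripped lines into segments at 'Thought:' lines,
--     then turn each segment into a step dict, keeping only non-empty dicts."""
--     lines = [l.strip() for l in content.split("\n")]
--
--     segments = []
--     current = []
--     for line in lines:
--         if line.startswith("Thought:"):
--             segments.append(current)
--             current = [line]
--         else:
--             current.append(line)
--     segments.append(current)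
--
--     steps = []
--     for seg in segments:
--         step = {}
--         for line in seg:
--             for key, prefix in (("thought", "Thought:"),
--                                 ("action", "Action:"),
--                                 ("observation", "Observation:")):
--                 if line.startswith(prefix):
--                     step[key] = line.replace(prefix, "").strip()
--                     break
--         if step:
--             steps.append(step)
--     return steps
-- ===== Notes on version B (the rewrite author's own statement) =====
-- stated objective: alternative
-- what changed: Replaced A's streaming flush-on-thought state machine by a two-phase group-then-parse: one pass partitions the stripped lines into segments starting at each thought-prefixed line, a second pass converts each segment into a step dict and keeps the non-empty ones.
import Mathlib
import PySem

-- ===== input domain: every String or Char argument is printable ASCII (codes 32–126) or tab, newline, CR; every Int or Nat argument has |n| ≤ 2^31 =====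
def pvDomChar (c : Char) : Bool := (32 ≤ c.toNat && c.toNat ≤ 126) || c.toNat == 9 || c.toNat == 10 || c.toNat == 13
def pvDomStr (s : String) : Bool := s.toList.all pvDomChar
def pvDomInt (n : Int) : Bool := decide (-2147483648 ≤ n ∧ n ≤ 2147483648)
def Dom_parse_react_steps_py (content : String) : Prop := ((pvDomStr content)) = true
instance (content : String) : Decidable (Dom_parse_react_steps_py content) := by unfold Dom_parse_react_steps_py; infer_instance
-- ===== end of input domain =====

-- B replaces A's streaming flush-on-thought state machine by a two-phase
-- group-then-parse decomposition (objective: alternative, same cost); return value only.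

-- ===== PORT A =====
-- one iteration of A's for-loop: state = (steps so far, current_step dict)
def pvAStep (st : List (List (String × String)) × PySem.Dict String String) (line0 : String) :
    List (List (String × String)) × PySem.Dict String String :=
  let line := PySem.Str.strip line0
  if PySem.Str.startswith line "Thought:" then
    ((if st.2.items ≠ [] then st.1 ++ [st.2.items] else st.1),
      PySem.Dict.ofList [("thought", PySem.Str.strip (PySem.Str.replace line "Thought:" ""))])
  else if PySem.Str.startswith line "Action:" then
    (st.1, st.2.insert "action" (PySem.Str.strip (PySem.Str.replace line "Action:" "")))
  else if PySem.Str.startswith line "Observation:" then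
    (st.1, st.2.insert "observation" (PySem.Str.strip (PySem.Str.replace line "Observation:" "")))
  else st

def parse_react_steps_py (content : String) : List (List (String × String)) :=
  -- content.split("\n"): the separator is non-empty, so split? is always `some`
  let lines := (PySem.Str.split? content "\n").getD []
  let fin := lines.foldl pvAStep ([], PySem.Dict.empty)
  if fin.2.items ≠ [] then fin.1 ++ [fin.2.items] else fin.1

-- ===== PORT B =====
-- inner for-(key,prefix) loop with break = first matching prefix assigns its key
def pvBLine (d : PySem.Dict String String) (line : String) : PySem.Dict String String :=
  if PySem.Str.startswith line "Thought:" then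
    d.insert "thought" (PySem.Str.strip (PySem.Str.replace line "Thought:" ""))
  else if PySem.Str.startswith line "Action:" then
    d.insert "action" (PySem.Str.strip (PySem.Str.replace line "Action:" ""))
  else if PySem.Str.startswith line "Observation:" then
    d.insert "observation" (PySem.Str.strip (PySem.Str.replace line "Observation:" ""))
  else d

-- phase 2, per segment: build the step dict
def pvBParseSeg (seg : List String) : PySem.Dict String String :=
  seg.foldl pvBLine PySem.Dict.empty

-- phase 1, one iteration: cut the line list at thought-prefixed lines
def pvBGroup (st : List (List String) × List String) (line : String) :
    List (List String) × List String :=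
  if PySem.Str.startswith line "Thought:" then (st.1 ++ [st.2], [line])
  else (st.1, st.2 ++ [line])

-- phase 2: keep the non-empty step dicts
def pvBCollect (segments : List (List String)) : List (List (String × String)) :=
  segments.foldl
    (fun steps seg =>
      if (pvBParseSeg seg).items ≠ [] then steps ++ [(pvBParseSeg seg).items] else steps) []

def parse_react_steps_py_alt (content : String) : List (List (String × String)) :=
  -- content.split("\n"): the separator is non-empty, so split? is always `some`
  let lines := ((PySem.Str.split? content "\n").getD []).map PySem.Str.strip
  let g := lines.foldl pvBGroup ([], [])
  pvBCollect (g.1 ++ [g.2])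

-- ===== PRECONDITION & SPEC =====
def Spec_parse_react_steps_py (content : String) (out : List (List (String × String))) : Prop := out = parse_react_steps_py_alt content
instance (content : String) (out : List (List (String × String))) : Decidable (Spec_parse_react_steps_py content out) := by unfold Spec_parse_react_steps_py; infer_instance

-- ===== CLAIM (what is proved, stated in full; the proofs are below) =====
def Claim_equal_parse_react_steps_py : Prop := ∀ (content : String), Dom_parse_react_steps_py content → Spec_parse_react_steps_py content (parse_react_steps_py content)

-- ===== LEMMAS AND PROOFS =====

theorem pvBCollect_concat (segs : List (List String)) (c : List String) :
    pvBCollect (segs ++ [c]) =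
      if (pvBParseSeg c).items ≠ [] then pvBCollect segs ++ [(pvBParseSeg c).items]
      else pvBCollect segs := by
  simp only [pvBCollect, List.foldl_append, List.foldl_cons, List.foldl_nil]

theorem pvBParseSeg_concat (seg : List String) (l : String) :
    pvBParseSeg (seg ++ [l]) = pvBLine (pvBParseSeg seg) l := by
  simp only [pvBParseSeg, List.foldl_append, List.foldl_cons, List.foldl_nil]

theorem pvSegThought (l : String)
    (hT : PySem.Str.startswith l "Thought:" = true) :
    pvBParseSeg [l] =
      PySem.Dict.ofList [("thought", PySem.Str.strip (PySem.Str.replace l "Thought:" ""))] := by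
  simp only [pvBParseSeg, List.foldl_cons, List.foldl_nil, pvBLine]
  rw [if_pos hT]
  rfl

-- the main invariant: A's streaming fold tracks B's grouping fold
theorem pvMain (lines : List String) (segs : List (List String)) (cur : List String) :
    lines.foldl pvAStep (pvBCollect segs, pvBParseSeg cur) =
      (pvBCollect (lines.foldl (fun st l => pvBGroup st (PySem.Str.strip l)) (segs, cur)).1,
       pvBParseSeg (lines.foldl (fun st l => pvBGroup st (PySem.Str.strip l)) (segs, cur)).2) := by
  induction lines generalizing segs cur with
  | nil => rfl
  | cons l rest ih =>
    simp only [List.foldl_cons]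
    by_cases hT : PySem.Str.startswith (PySem.Str.strip l) "Thought:" = true
    · have h2 : pvBGroup (segs, cur) (PySem.Str.strip l) = (segs ++ [cur], [PySem.Str.strip l]) := by
        simp only [pvBGroup]; rw [if_pos hT]
      have h1 : pvAStep (pvBCollect segs, pvBParseSeg cur) l
          = (pvBCollect (segs ++ [cur]), pvBParseSeg [PySem.Str.strip l]) := by
        simp only [pvAStep]
        rw [if_pos hT, pvBCollect_concat, pvSegThought _ hT]
      rw [h1, h2, ih]
    · have h2 : pvBGroup (segs, cur) (PySem.Str.strip l) = (segs, cur ++ [PySem.Str.strip l]) := by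
        simp only [pvBGroup]; rw [if_neg hT]
      have h1 : pvAStep (pvBCollect segs, pvBParseSeg cur) l
          = (pvBCollect segs, pvBParseSeg (cur ++ [PySem.Str.strip l])) := by
        rw [pvBParseSeg_concat]
        simp only [pvAStep, pvBLine]
        rw [if_neg hT, if_neg hT]
        split_ifs <;> rfl
      rw [h1, h2, ih]

theorem pvInit :
    (([], PySem.Dict.empty) : List (List (String × String)) × PySem.Dict String String)
      = (pvBCollect [], pvBParseSeg []) := rfl

-- ===== VERDICT (by name: the statement is the Claim_ definition above) =====
theorem parse_react_steps_py_spec : Claim_equal_parse_react_steps_py := by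
  intro content _
  unfold Spec_parse_react_steps_py
  simp only [parse_react_steps_py, parse_react_steps_py_alt]
  rw [List.foldl_map, pvInit, pvMain, pvBCollect_concat]
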